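-- pv_equiv track=rewrite | github.com/heeyong222/AlgorithmPractice | programmers/k번째수.py | solution
-- ===== SOURCE A (Python) =====
-- def solution(array, commands):
--     answer = []
--     for cmd in commands:
--         i = cmd[0]
--         j = cmd[1]
--         k = cmd[2]
--         ans = sorted(array[i - 1:j])
--         answer.append(ans[k - 1])
--     return answer
-- ===== SOURCE B (Python) =====
-- def solution(array, commands):
--     # Selection by iterated minimum removal: remove the minimum k-1 times from
--     # a copy of the slice, then the minimum of what remains is the k-th smallest.
--     # No sorting. Raises ValueError (min of empty) when the slice is empty;
--     # for k <= 0 it returns min(slice) (A's negative-index wraparound is excluded by Pre_).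
--     def kth(seg, k):
--         for _ in range(k - 1):
--             seg.remove(min(seg))
--         return min(seg)
--     return [kth(array[cmd[0] - 1:cmd[1]], cmd[2]) for cmd in commands]
-- ===== Notes on version B (the rewrite author's own statement) =====
-- stated objective: alternative
-- what changed: Replaces sorting each slice and indexing (sorted(seg)[k-1]) with selection by iterated minimum removal: remove the minimum k-1 times from a copy of the slice, then take the minimum of what remains.
-- outside the precondition, e.g. on solution([1, 2, 3], [[1, 3, 0]]): A returns [3], B returns [1]; on solution([1, 2], [[1, 2, 3]]): A raises IndexError, B raises ValueError
import Mathlib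
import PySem

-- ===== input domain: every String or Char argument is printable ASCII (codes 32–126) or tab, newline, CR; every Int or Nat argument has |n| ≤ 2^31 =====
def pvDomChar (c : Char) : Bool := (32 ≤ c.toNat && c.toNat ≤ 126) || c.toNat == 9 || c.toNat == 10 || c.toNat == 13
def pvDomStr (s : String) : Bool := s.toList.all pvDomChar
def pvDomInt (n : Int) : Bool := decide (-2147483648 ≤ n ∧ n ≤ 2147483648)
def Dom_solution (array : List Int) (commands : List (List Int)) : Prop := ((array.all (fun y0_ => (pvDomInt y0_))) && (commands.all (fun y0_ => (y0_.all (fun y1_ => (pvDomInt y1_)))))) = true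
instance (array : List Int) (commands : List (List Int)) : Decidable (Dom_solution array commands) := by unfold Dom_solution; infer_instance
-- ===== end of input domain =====

-- B replaces per-command sorting+indexing by selection via iterated minimum removal (objective: alternative).

-- ===== PORT A =====
-- cmd[0], cmd[1], cmd[2] and ans[k-1] would raise IndexError outside Pre_; the
-- getD-default 0 is a placeholder never reached under Pre_solution.
def solution (array : List Int) (commands : List (List Int)) : List Int :=
  commands.foldl (fun answer cmd =>
    let i := PySem.List.pyGetD cmd 0 0
    let j := PySem.List.pyGetD cmd 1 0
    let k := PySem.List.pyGetD cmd 2 0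
    let ans := PySem.List.sorted (PySem.List.slice array (some (i - 1)) (some j)) (fun x => x) false
    answer ++ [PySem.List.pyGetD ans (k - 1) 0]) []

-- ===== PORT B =====
-- the 'for _ in range(k-1): seg.remove(min(seg))' loop of Source B; min of an empty
-- list raises ValueError outside Pre_, so the getD-defaults here are placeholders
-- never reached under Pre_solution.
def pvDropMins : Nat → List Int → List Int
  | 0, s => s
  | n + 1, s =>
      pvDropMins n ((PySem.List.remove? s ((PySem.List.min? s (fun x => x)).getD 0)).getD s)

-- the list comprehension of Source B, with kth inlined: drop the minimum k-1 times, then min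
def solution_alt (array : List Int) (commands : List (List Int)) : List Int :=
  commands.map (fun cmd =>
    (PySem.List.min?
        (pvDropMins (PySem.List.pyGetD cmd 2 0 - 1).toNat
          (PySem.List.slice array (some (PySem.List.pyGetD cmd 0 0 - 1))
            (some (PySem.List.pyGetD cmd 1 0))))
        (fun x => x)).getD 0)

-- ===== PRECONDITION & SPEC =====
-- Pre_ excludes commands with fewer than 3 entries or with k outside 1..len(slice):
-- A raises IndexError there, except for k ≤ 0 where A's negative-index wraparound
-- returns an element from the end of the sorted slice — an artefact of Python
-- indexing no caller of this 1-based API would specify — while B returns the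
-- slice's minimum (its removal loop runs zero times).
def Pre_solution (array : List Int) (commands : List (List Int)) : Prop :=
  ∀ cmd ∈ commands, 3 ≤ cmd.length ∧
    1 ≤ PySem.List.pyGetD cmd 2 0 ∧
    PySem.List.pyGetD cmd 2 0 ≤
      ((PySem.List.slice array (some (PySem.List.pyGetD cmd 0 0 - 1))
          (some (PySem.List.pyGetD cmd 1 0))).length : Int)
instance (array : List Int) (commands : List (List Int)) : Decidable (Pre_solution array commands) := by
  unfold Pre_solution; infer_instance
def pvWitness_solution : List Int × List (List Int) := ([1, 5, 2, 6, 3, 7, 4], [[2, 5, 3], [4, 4, 1], [1, 7, 3]])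
def Spec_solution (array : List Int) (commands : List (List Int)) (out : List Int) : Prop := out = solution_alt array commands
instance (array : List Int) (commands : List (List Int)) (out : List Int) : Decidable (Spec_solution array commands out) := by unfold Spec_solution; infer_instance

-- ===== CLAIM (what is proved, stated in full; the proofs are below) =====
def Claim_equal_solution : Prop := ∀ (array : List Int) (commands : List (List Int)), Dom_solution array commands → Pre_solution array commands → Spec_solution array commands (solution array commands)

-- ===== LEMMAS AND PROOFS =====

-- min (first minimal element) has the same VALUE as the head of the sorted list.
theorem pv_min_eq_sorted_head (xs : List Int) :
    PySem.List.min? xs (fun x => x) = (PySem.List.sorted xs (fun x => x) false).head? := by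
  cases hxs : xs with
  | nil => simp [PySem.List.min?, PySem.List.sorted]
  | cons a t =>
    cases hs : PySem.List.sorted (a :: t) (fun x => x) false with
    | nil => exact absurd ((PySem.List.sorted_eq_nil_iff _ _ _).mp hs) (by simp)
    | cons m s =>
      cases hm : PySem.List.min? (a :: t) (fun x => x) with
      | none => exact absurd ((PySem.List.min?_eq_none_iff _ _).mp hm) (by simp)
      | some v =>
        have hvmem : v ∈ (a :: t) := PySem.List.min?_mem hm
        have hmmem : m ∈ (a :: t) := by
          have : m ∈ PySem.List.sorted (a :: t) (fun x => x) false := by rw [hs]; exact List.mem_cons_self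
          exact (PySem.List.mem_sorted _ _ _ _).mp this
        have h1 : v ≤ m := PySem.List.min?_isMin hm m hmmem
        have h2 : m ≤ v := PySem.List.key_head_sorted_le _ _ hs v hvmem
        simp [List.head?, le_antisymm h1 h2]

-- One removal step of Source B's loop: sorting afterwards = dropping the head of the sorted list.
theorem pv_step_sorted (xs : List Int) (hxs : xs ≠ []) :
    PySem.List.sorted
        ((PySem.List.remove? xs ((PySem.List.min? xs (fun x => x)).getD 0)).getD xs)
        (fun x => x) false
      = (PySem.List.sorted xs (fun x => x) false).tail := by
  cases hm : PySem.List.min? xs (fun x => x) with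
  | none => exact absurd ((PySem.List.min?_eq_none_iff _ _).mp hm) hxs
  | some v =>
    have hvmem : v ∈ xs := PySem.List.min?_mem hm
    rw [Option.getD_some, PySem.List.remove?_eq_some_erase xs v hvmem, Option.getD_some]
    cases hs : PySem.List.sorted xs (fun x => x) false with
    | nil => exact absurd ((PySem.List.sorted_eq_nil_iff _ _ _).mp hs) hxs
    | cons m s =>
      have hv : v = m := by
        have hmmem : m ∈ xs := by
          have : m ∈ PySem.List.sorted xs (fun x => x) false := by rw [hs]; exact List.mem_cons_self
          exact (PySem.List.mem_sorted _ _ _ _).mp this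
        exact le_antisymm (PySem.List.min?_isMin hm m hmmem) (PySem.List.key_head_sorted_le _ _ hs v hvmem)
      have hperm : s.Perm (xs.erase v) := by
        have h1 : (PySem.List.sorted xs (fun x => x) false).Perm xs :=
          PySem.List.sorted_perm xs (fun x => x) false
        have h2 : ((PySem.List.sorted xs (fun x => x) false).erase v).Perm (xs.erase v) :=
          h1.erase v
        rw [hv]; rwa [hs, hv, List.erase_cons_head] at h2
      have hpw : s.Pairwise (fun a b => a ≤ b) := by
        have := PySem.List.sorted_pairwise (xs := xs) (key := fun x => x)
        rw [hs] at this
        exact this.tail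
      rw [List.tail_cons]
      exact PySem.List.sorted_id_eq_of_perm_of_pairwise _ _ hperm hpw

-- Invariant of Source B's removal loop: after n removals the sorted remainder is the
-- sorted original with its first n elements dropped.
theorem pv_dropMins_sorted (n : Nat) : ∀ (xs : List Int), n ≤ xs.length →
    PySem.List.sorted (pvDropMins n xs) (fun x => x) false
      = (PySem.List.sorted xs (fun x => x) false).drop n := by
  induction n with
  | zero => intro xs _; simp [pvDropMins]
  | succ n ih =>
    intro xs hlen
    have hxs : xs ≠ [] := by intro h; subst h; simp at hlen
    have hstep := pv_step_sorted xs hxs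
    have hlenstep :
        ((PySem.List.remove? xs ((PySem.List.min? xs (fun x => x)).getD 0)).getD xs).length
          = xs.length - 1 := by
      have h1 := congrArg List.length hstep
      rw [PySem.List.length_sorted, List.length_tail, PySem.List.length_sorted] at h1
      exact h1
    rw [pvDropMins, ih _ (by omega), hstep, List.drop_tail]

theorem pv_kth_eq (seg : List Int) (k : Int) (h1 : 1 ≤ k) (h2 : k ≤ (seg.length : Int)) :
    (PySem.List.min? (pvDropMins (k - 1).toNat seg) (fun x => x)).getD 0
      = PySem.List.pyGetD (PySem.List.sorted seg (fun x => x) false) (k - 1) 0 := by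
  have hn : (k - 1).toNat < seg.length := by omega
  rw [pv_min_eq_sorted_head, pv_dropMins_sorted _ _ (by omega),
      PySem.List.pyGetD_eq_getElem _ 0 (by omega) (by rw [PySem.List.length_sorted]; omega)]
  have hlt : (k - 1).toNat < (PySem.List.sorted seg (fun x => x) false).length := by
    rw [PySem.List.length_sorted]; omega
  rw [List.head?_drop, List.getElem?_eq_getElem hlt, Option.getD_some]

-- ===== VERDICT =====
theorem solution_spec : Claim_equal_solution := by
  intro array commands _ hpre
  unfold Spec_solution solution solution_alt
  rw [PySem.List.foldl_append_singleton_eq_map]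
  simp only [List.nil_append]
  refine List.map_congr_left ?_
  intro cmd hmem
  obtain ⟨-, hk1, hk2⟩ := hpre cmd hmem
  exact (pv_kth_eq _ _ hk1 hk2).symm
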